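-- pv_equiv track=rewrite | github.com/OussamaLay/Graph_Burning_Problem | algo_recherche.py | iterations_brulage_totale
-- ===== SOURCE A (Python) =====
-- def iterations_brulage_totale(graphe, chemin):
--     """
--     Retourne le nombre d'itérations nécessaires pour que tous les sommets du graphe soient brûlés.
--     Optimisé pour de grands graphes en utilisant des entiers pour représenter l'état :
--       0 : non brûlé
--       1 : en attente de brûlage (jaune)
--       2 : brûlé (rouge)
--
--     :param graphe: Dictionnaire représentant le graphe (liste d'adjacence).
--     :param chemin: Liste des sommets choisis comme sources de feu.
--     :return: Nombre d'itérations pour brûler entièrement le graphe.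
--     """
--     total = len(graphe)
--     # Initialisation: tous les sommets sont en état 0 (non brûlés)
--     state = {sommet: 0 for sommet in graphe}
--     burned = set()   # Ensemble des sommets brûlés (état 2)
--     to_burn = set()  # Ensemble des sommets en attente de brûlage (état 1)
--     iteration = 0
--
--     while len(burned) < total:
--         iteration += 1
--         new_burned = set()
--
--         # Ajout de la source externe pour cette itération, si disponible
--         if iteration <= len(chemin):
--             source = chemin[iteration - 1]
--             if state[source] != 2:
--                 state[source] = 2
--                 burned.add(source)
--                 new_burned.add(source)
--
--         # Les sommets en attente (état 1) deviennent brûlés (état 2)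
--         if to_burn:
--             new_burned |= to_burn
--             for node in to_burn:
--                 state[node] = 2
--             burned |= to_burn
--             to_burn.clear()
--
--         # Propagation du feu : depuis chaque nouveau sommet brûlé, colorier les voisins non brûlés
--         for node in new_burned:
--             for voisin in graphe[node]:
--                 if state[voisin] == 0:
--                     state[voisin] = 1
--                     to_burn.add(voisin)
--
--     return iteration
-- ===== SOURCE B (Python) =====
-- def iterations_brulage_totale(graphe, chemin):
--     # Burn-time computation instead of a step-by-step fire simulation: source
--     # chemin[j] (when it is a vertex) ignites at time j+1, and a vertex at graph
--     # distance d from it burns at time j+1+d.  Burn times are computed by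
--     # Bellman-Ford-style edge relaxation (a source delayed by j behaves like a
--     # chain of j extra edges, whence the round bound) with an early exit at the
--     # fixpoint; the answer is the largest burn time over the vertices (0 if none).
--     bt = {}
--     for j, s in enumerate(chemin):
--         if s in graphe and (s not in bt or j + 1 < bt[s]):
--             bt[s] = j + 1
--     for _ in range(len(graphe) + len(chemin)):
--         changed = False
--         for u, voisins in graphe.items():
--             if u in bt:
--                 t = bt[u] + 1
--                 for w in voisins:
--                     if w not in bt or t < bt[w]:
--                         bt[w] = t
--                         changed = True
--         if not changed:
--             break
--     return max((bt[v] for v in graphe), default=0)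
-- ===== Notes on version B (the rewrite author's own statement) =====
-- stated objective: alternative
-- what changed: A simulates the burning tick by tick with a per-vertex state dict (0/1/2), burned/pending sets and a completion test each round; B never simulates: it computes each vertex's burn time (source chemin[j] ignites at j+1, a vertex at distance d from it burns at j+1+d) by Bellman-Ford-style edge relaxation with an early exit at the fixpoint, and returns the largest burn time.
import Mathlib
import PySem

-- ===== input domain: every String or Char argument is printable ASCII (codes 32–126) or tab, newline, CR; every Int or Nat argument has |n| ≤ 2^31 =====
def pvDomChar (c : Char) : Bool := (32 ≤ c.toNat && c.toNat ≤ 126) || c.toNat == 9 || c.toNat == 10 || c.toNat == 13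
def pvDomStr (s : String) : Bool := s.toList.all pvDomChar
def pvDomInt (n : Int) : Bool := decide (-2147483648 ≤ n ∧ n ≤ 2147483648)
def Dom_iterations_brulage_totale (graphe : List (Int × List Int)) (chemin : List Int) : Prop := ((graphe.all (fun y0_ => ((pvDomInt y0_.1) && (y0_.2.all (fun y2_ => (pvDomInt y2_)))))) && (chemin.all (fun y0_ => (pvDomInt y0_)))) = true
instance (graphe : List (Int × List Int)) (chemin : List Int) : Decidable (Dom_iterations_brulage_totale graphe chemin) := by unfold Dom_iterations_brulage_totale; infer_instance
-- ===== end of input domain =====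

-- B replaces A's tick-by-tick burning simulation by a direct burn-time computation
-- (Bellman-Ford edge relaxation with staggered source times, then the maximum);
-- objective: alternative algorithm, similar cost. Equivalence is proved on Pre_.

-- ===== PORT A =====
-- A's while-loop is ported with fuel (the loop may diverge outside Pre_; under Pre_ the
-- fuel is proved sufficient, so it is never exhausted on admitted inputs).
-- Python's set iteration order (over new_burned / to_burn) is consumed only where the
-- result cannot depend on it (set/dict updates and the final count), so PySem.Set is exact.
-- graphe[node] / state[...] raise KeyError off the dict in Python; the total getD below is
-- only reached on keys under Pre_, which excludes exactly those inputs.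

-- for voisin in graphe[node]: if state[voisin] == 0: state[voisin] = 1; to_burn.add(voisin)
def pvPropagate (g : PySem.Dict Int (List Int)) (node : Int)
    (acc : PySem.Dict Int Int × PySem.Set Int) : PySem.Dict Int Int × PySem.Set Int :=
  (g.getD node []).foldl
    (fun acc voisin =>
      if acc.1.getD voisin 0 == 0 then (acc.1.insert voisin 1, PySem.Set.add acc.2 voisin)
      else acc) acc

-- "Ajout de la source externe pour cette itération"; returns (state, burned, new_burned)
def pvSourceStep (chemin : List Int) (iteration : Int)
    (state : PySem.Dict Int Int) (burned : PySem.Set Int) :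
    PySem.Dict Int Int × PySem.Set Int × PySem.Set Int :=
  if iteration ≤ (chemin.length : Int) then
    let source := (PySem.List.pyGet? chemin (iteration - 1)).getD 0  -- in range: 1 ≤ iteration ≤ len(chemin)
    if state.getD source 0 != 2 then
      (state.insert source 2, PySem.Set.add burned source,
       PySem.Set.add (PySem.Set.empty) source)
    else (state, burned, (PySem.Set.empty : PySem.Set Int))
  else (state, burned, (PySem.Set.empty : PySem.Set Int))

-- pending vertices burn (to_burn is cleared), then fire propagates from every newly
-- burned vertex; returns (state, burned, to_burn)
def pvBurnStep (g : PySem.Dict Int (List Int)) (state : PySem.Dict Int Int)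
    (newBurned burned toBurn : PySem.Set Int) :
    PySem.Dict Int Int × PySem.Set Int × PySem.Set Int :=
  let b :=
    if toBurn != ([] : List Int) then
      (PySem.Set.union newBurned toBurn,
       toBurn.foldl (fun st node => st.insert node (2 : Int)) state,
       PySem.Set.union burned toBurn)
    else (newBurned, state, burned)
  let cc := b.1.foldl (fun acc node => pvPropagate g node acc)
    (b.2.1, (PySem.Set.empty : PySem.Set Int))
  (cc.1, b.2.2, cc.2)

-- one body of A's while-loop, entered with the already incremented iteration counter
def pvIterA (g : PySem.Dict Int (List Int)) (chemin : List Int) (iteration : Int)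
    (state : PySem.Dict Int Int) (burned toBurn : PySem.Set Int) :
    PySem.Dict Int Int × PySem.Set Int × PySem.Set Int :=
  let a := pvSourceStep chemin iteration state burned
  pvBurnStep g a.1 a.2.2 a.2.1 toBurn

def pvLoopA (g : PySem.Dict Int (List Int)) (chemin : List Int) (total : Int) :
    Nat → PySem.Dict Int Int → PySem.Set Int → PySem.Set Int → Int → Int
  | 0, _, _, _, iteration => iteration  -- fuel exhausted: never reached under Pre_
  | fuel + 1, state, burned, toBurn, iteration =>
    if PySem.Set.len burned < total then
      let r := pvIterA g chemin (iteration + 1) state burned toBurn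
      pvLoopA g chemin total fuel r.1 r.2.1 r.2.2 (iteration + 1)
    else iteration

def iterations_brulage_totale (graphe : List (Int × List Int)) (chemin : List Int) : Int :=
  let g := PySem.Dict.ofList graphe
  let total : Int := (g.size : Int)
  let state := g.keys.foldl (fun d sommet => d.insert sommet (0 : Int)) PySem.Dict.empty
  pvLoopA g chemin total (chemin.length + g.size + 1) state PySem.Set.empty PySem.Set.empty 0

-- ===== PORT B =====
-- transliteration of Source B: tentative burn times bt (a dict) are seeded from the sources
-- (chemin[j], when it is a vertex, ignites at time j+1) and lowered by Bellman-Ford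
-- edge relaxation rounds over graphe.items() until a round changes nothing (or the
-- round bound len(graphe)+len(chemin) is exhausted); result = max(bt.values(), default=0).

-- for w in voisins: if w not in bt or t < bt[w]: bt[w] = t; changed = True
def pvRelaxEdge (t : Int) (ac : PySem.Dict Int Int × Bool) (w : Int) :
    PySem.Dict Int Int × Bool :=
  match ac.1.get? w with
  | none => (ac.1.insert w t, true)
  | some tw => if t < tw then (ac.1.insert w t, true) else ac

-- if u in bt: t = bt[u] + 1; <relax every edge u -> w>
def pvRelaxVertex (ac : PySem.Dict Int Int × Bool) (p : Int × List Int) :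
    PySem.Dict Int Int × Bool :=
  match ac.1.get? p.1 with
  | none => ac
  | some tu => p.2.foldl (pvRelaxEdge (tu + 1)) ac

-- for _ in range(len(graphe)+len(chemin)): <one relaxation round>; if not changed: break
def pvRoundsB (g : PySem.Dict Int (List Int)) : Nat → PySem.Dict Int Int → PySem.Dict Int Int
  | 0, bt => bt
  | fuel + 1, bt =>
    let r := g.items.foldl pvRelaxVertex (bt, false)
    if r.2 then pvRoundsB g fuel r.1 else r.1

def iterations_brulage_totale_alt (graphe : List (Int × List Int)) (chemin : List Int) : Int :=
  let g := PySem.Dict.ofList graphe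
  let bt0 := (PySem.List.enumerate chemin).foldl
    (fun bt p =>
      if g.contains p.2 then
        match bt.get? p.2 with
        | none => bt.insert p.2 (p.1 + 1)
        | some tb => if p.1 + 1 < tb then bt.insert p.2 (p.1 + 1) else bt
      else bt) PySem.Dict.empty
  -- max((bt[v] for v in graphe), default=0): bt[v] raises KeyError in Python when v has
  -- no burn time; wherever Python B returns, every vertex has an entry, so getD is exact
  PySem.List.maxD (g.keys.map (fun k => (pvRoundsB g (g.size + chemin.length) bt0).getD k 0))
    (fun x => x) 0

-- ===== PRECONDITION & SPEC =====

-- neighbourhood of a finite vertex set (adjacency read exactly as both ports read it)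
def pvN (g : PySem.Dict Int (List Int)) (s : Finset Int) : Finset Int :=
  s.biUnion fun u => (g.getD u []).toFinset

-- the source ignited at iteration n+1 (as a set; empty beyond the end of chemin)
def pvSrc (chemin : List Int) (n : Nat) : Finset Int :=
  match chemin[n]? with
  | some x => {x}
  | none => ∅

-- the burning process, mathematically: after n iterations, (burnt set, pending set)
def pvSF (g : PySem.Dict Int (List Int)) (ch : List Int) : Nat → Finset Int × Finset Int
  | 0 => (∅, ∅)
  | n + 1 =>
    let p := pvSF g ch n
    let nb := (pvSrc ch n \ p.1) ∪ p.2
    (p.1 ∪ nb, pvN g nb \ (p.1 ∪ nb))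

def pvS (g : PySem.Dict Int (List Int)) (ch : List Int) (n : Nat) : Finset Int := (pvSF g ch n).1

-- Pre_ admits exactly the inputs where Python A returns: every listed neighbour is a
-- vertex (else state[voisin] raises KeyError once its owner burns), the whole graph
-- burns (else the while-loop never terminates), and any fire source that is not a
-- vertex appears only at an iteration the loop no longer reaches because the graph is
-- already fully burnt (else state[source] raises KeyError).
def Pre_iterations_brulage_totale (graphe : List (Int × List Int)) (chemin : List Int) : Prop :=
  (∀ k ∈ (PySem.Dict.ofList graphe).keys,
      ∀ w ∈ (PySem.Dict.ofList graphe).getD k [], w ∈ (PySem.Dict.ofList graphe).keys) ∧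
  ((PySem.Dict.ofList graphe).keys.toFinset ⊆
      pvS (PySem.Dict.ofList graphe) chemin (chemin.length + (PySem.Dict.ofList graphe).size)) ∧
  (∀ j : Nat, j < chemin.length → chemin.getD j 0 ∉ (PySem.Dict.ofList graphe).keys →
      (PySem.Dict.ofList graphe).keys.toFinset ⊆ pvS (PySem.Dict.ofList graphe) chemin j)

instance (graphe : List (Int × List Int)) (chemin : List Int) :
    Decidable (Pre_iterations_brulage_totale graphe chemin) := by
  unfold Pre_iterations_brulage_totale; infer_instance

def pvWitness_iterations_brulage_totale : (List (Int × List Int)) × List Int :=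
  ([(1, [2]), (2, [1])], [1])

def Spec_iterations_brulage_totale (graphe : List (Int × List Int)) (chemin : List Int) (out : Int) : Prop := out = iterations_brulage_totale_alt graphe chemin
instance (graphe : List (Int × List Int)) (chemin : List Int) (out : Int) : Decidable (Spec_iterations_brulage_totale graphe chemin out) := by unfold Spec_iterations_brulage_totale; infer_instance

-- ===== CLAIM (what is proved, stated in full; the proofs are below) =====
def Claim_equal_iterations_brulage_totale : Prop := ∀ (graphe : List (Int × List Int)) (chemin : List Int), Dom_iterations_brulage_totale graphe chemin → Pre_iterations_brulage_totale graphe chemin → Spec_iterations_brulage_totale graphe chemin (iterations_brulage_totale graphe chemin)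

-- ===== LEMMAS AND PROOFS =====

def pvF (g : PySem.Dict Int (List Int)) (ch : List Int) (n : Nat) : Finset Int := (pvSF g ch n).2

-- NB n = vertices newly burnt at iteration n
def pvNB (g : PySem.Dict Int (List Int)) (ch : List Int) : Nat → Finset Int
  | 0 => ∅
  | n + 1 => (pvSrc ch n \ pvS g ch n) ∪ pvF g ch n

lemma pvS_zero (g : PySem.Dict Int (List Int)) (ch : List Int) : pvS g ch 0 = ∅ := rfl
lemma pvF_zero (g : PySem.Dict Int (List Int)) (ch : List Int) : pvF g ch 0 = ∅ := rfl

lemma pvNB_succ (g : PySem.Dict Int (List Int)) (ch : List Int) (n : Nat) :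
    pvNB g ch (n + 1) = (pvSrc ch n \ pvS g ch n) ∪ pvF g ch n := rfl

lemma pvS_succ (g : PySem.Dict Int (List Int)) (ch : List Int) (n : Nat) :
    pvS g ch (n + 1) = pvS g ch n ∪ pvNB g ch (n + 1) := by
  simp [pvS, pvSF, pvNB, pvF]

lemma pvF_succ (g : PySem.Dict Int (List Int)) (ch : List Int) (n : Nat) :
    pvF g ch (n + 1) = pvN g (pvNB g ch (n + 1)) \ pvS g ch (n + 1) := by
  simp [pvS, pvF, pvSF, pvNB]

lemma pvS_mono (g : PySem.Dict Int (List Int)) (ch : List Int) {m n : Nat} (h : m ≤ n) :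
    pvS g ch m ⊆ pvS g ch n := by
  induction n with
  | zero => simp_all
  | succ k ih =>
    rcases Nat.lt_or_ge m (k + 1) with h' | h'
    · exact (ih (by omega)).trans (by rw [pvS_succ]; exact Finset.subset_union_left)
    · have : m = k + 1 := by omega
      subst this; rfl

lemma pvN_mono (g : PySem.Dict Int (List Int)) {s t : Finset Int} (h : s ⊆ t) :
    pvN g s ⊆ pvN g t := Finset.biUnion_subset_biUnion_of_subset_left _ h

lemma pvN_empty (g : PySem.Dict Int (List Int)) : pvN g ∅ = ∅ := rfl

lemma pvN_insert (g : PySem.Dict Int (List Int)) (u : Int) (s : Finset Int) :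
    pvN g (insert u s) = (g.getD u []).toFinset ∪ pvN g s := Finset.biUnion_insert ..

lemma pvN_union (g : PySem.Dict Int (List Int)) (s t : Finset Int) :
    pvN g (s ∪ t) = pvN g s ∪ pvN g t := by
  ext x; simp [pvN, Finset.mem_biUnion, or_and_right, exists_or]

lemma pvF_subset_NB_succ (g : PySem.Dict Int (List Int)) (ch : List Int) (n : Nat) :
    pvF g ch n ⊆ pvNB g ch (n + 1) := by
  simp [pvNB]

lemma pvNB_subset_S_succ (g : PySem.Dict Int (List Int)) (ch : List Int) (n : Nat) :
    pvNB g ch (n + 1) ⊆ pvS g ch (n + 1) := by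
  rw [pvS_succ]; exact Finset.subset_union_right

lemma pvN_S_subset (g : PySem.Dict Int (List Int)) (ch : List Int) (n : Nat) :
    pvN g (pvS g ch n) ⊆ pvS g ch (n + 1) := by
  induction n with
  | zero => simp [pvS_zero, pvN_empty]
  | succ k ih =>
    rw [pvS_succ g ch k, pvN_union]
    apply Finset.union_subset
    · exact ih.trans (pvS_mono g ch (Nat.le_succ _))
    · intro x hx
      by_cases hxs : x ∈ pvS g ch (k + 1)
      · exact pvS_mono g ch (Nat.le_succ _) hxs
      · have hxF : x ∈ pvF g ch (k + 1) := by
          rw [pvF_succ]; exact Finset.mem_sdiff.mpr ⟨hx, hxs⟩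
        exact pvNB_subset_S_succ g ch (k + 1) (pvF_subset_NB_succ g ch (k + 1) hxF)

lemma pvSrc_subset_S (g : PySem.Dict Int (List Int)) (ch : List Int) {n : Nat}
    (_h : n < ch.length) : pvSrc ch n ⊆ pvS g ch (n + 1) := by
  intro x hx
  rw [pvS_succ]
  simp only [Finset.mem_union]
  by_cases hxs : x ∈ pvS g ch n
  · exact Or.inl hxs
  · exact Or.inr (by
      rw [pvNB_succ]
      exact Finset.mem_union_left _ (Finset.mem_sdiff.mpr ⟨hx, hxs⟩))

lemma pvF_sub_N_S (g : PySem.Dict Int (List Int)) (ch : List Int) (n : Nat) :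
    pvF g ch n ⊆ pvN g (pvS g ch n) := by
  cases n with
  | zero => simp [pvF_zero]
  | succ k =>
    rw [pvF_succ]
    exact Finset.sdiff_subset.trans (pvN_mono g (pvNB_subset_S_succ g ch k))

-- one iteration of the process, decomposed (used by the B-side upper bound)
lemma pvS_succ_sub (g : PySem.Dict Int (List Int)) (ch : List Int) (n : Nat) :
    pvS g ch (n + 1) ⊆ pvSrc ch n ∪ pvS g ch n ∪ pvN g (pvS g ch n) := by
  rw [pvS_succ, pvNB_succ]
  intro x hx
  rcases Finset.mem_union.mp hx with h | h
  · exact Finset.mem_union_left _ (Finset.mem_union_right _ h)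
  · rcases Finset.mem_union.mp h with h' | h'
    · exact Finset.mem_union_left _ (Finset.mem_union_left _ (Finset.mem_sdiff.mp h').1)
    · exact Finset.mem_union_right _ (pvF_sub_N_S g ch n h')

lemma pvAdj_subset_keys (g : PySem.Dict Int (List Int))
    (hadj : ∀ k ∈ g.keys, ∀ w ∈ g.getD k [], w ∈ g.keys) :
    ∀ u, ∀ w ∈ g.getD u [], w ∈ g.keys := by
  intro u w hw
  by_cases hu : u ∈ g.keys
  · exact hadj u hu w hw
  · have hcf : g.contains u = false := by
      rw [← Bool.not_eq_true, PySem.Dict.contains_iff_mem_keys]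
      exact hu
    rw [PySem.Dict.getD_of_not_contains _ _ hcf] at hw
    simp at hw

lemma pvN_subset_keys (g : PySem.Dict Int (List Int))
    (hadj : ∀ k ∈ g.keys, ∀ w ∈ g.getD k [], w ∈ g.keys) (s : Finset Int) :
    pvN g s ⊆ g.keys.toFinset := by
  intro x hx
  simp only [pvN, Finset.mem_biUnion] at hx
  obtain ⟨u, -, hx⟩ := hx
  rw [List.mem_toFinset] at hx ⊢
  exact pvAdj_subset_keys g hadj u x hx

-- all vertices touched before the loop's last iteration T are graph keys
lemma pvS_keys_le (g : PySem.Dict Int (List Int)) (ch : List Int) (T : Nat)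
    (hadj : ∀ k ∈ g.keys, ∀ w ∈ g.getD k [], w ∈ g.keys)
    (hcT : ∀ (j : Nat) (hj : j < ch.length), j < T → ch[j]'hj ∈ g.keys) :
    ∀ n, n ≤ T → pvS g ch n ⊆ g.keys.toFinset ∧ pvF g ch n ⊆ g.keys.toFinset := by
  intro n
  induction n with
  | zero => intro _; simp [pvS_zero, pvF_zero]
  | succ k ih =>
    intro hk
    have ihk := ih (by omega)
    have hsrc : pvSrc ch k ⊆ g.keys.toFinset := by
      intro x hx
      cases hsome : ch[k]? with
      | none => simp [pvSrc, hsome] at hx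
      | some y =>
        simp only [pvSrc, hsome, Finset.mem_singleton] at hx
        have hkl : k < ch.length := (List.getElem?_eq_some_iff.mp hsome).1
        have hy : ch[k] = y := Option.some.inj ((List.getElem?_eq_getElem hkl) ▸ hsome)
        rw [List.mem_toFinset, hx, ← hy]
        exact hcT k hkl (by omega)
    have hNB : pvNB g ch (k + 1) ⊆ g.keys.toFinset := by
      rw [pvNB_succ]
      exact Finset.union_subset (Finset.sdiff_subset.trans hsrc) ihk.2
    constructor
    · rw [pvS_succ]; exact Finset.union_subset ihk.1 hNB
    · rw [pvF_succ]
      exact Finset.sdiff_subset.trans (pvN_subset_keys g hadj _)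

-- ===== A-side invariant =====

def pvInvA (g : PySem.Dict Int (List Int)) (ch : List Int) (n : Nat)
    (state : PySem.Dict Int Int) (burned toBurn : PySem.Set Int) : Prop :=
  (∀ v, state.getD v 0 = if v ∈ pvS g ch n then 2 else if v ∈ pvF g ch n then 1 else 0) ∧
  burned.Nodup ∧ burned.toFinset = pvS g ch n ∧
  toBurn.Nodup ∧ toBurn.toFinset = pvF g ch n

lemma pvGetD_foldl_insert_const (l : List Int) (d : PySem.Dict Int Int) (cv v : Int) :
    (l.foldl (fun d x => d.insert x cv) d).getD v 0 = if v ∈ l then cv else d.getD v 0 := by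
  induction l generalizing d with
  | nil => simp
  | cons x xs ih =>
    simp only [List.foldl_cons, ih, PySem.Dict.getD_insert, List.mem_cons]
    by_cases hx : v ∈ xs <;> by_cases hv : v = x <;> simp [hx, hv]

lemma pvPropFold_desc (S' : Finset Int) :
    ∀ (ws : List Int) (X : Finset Int) (p : PySem.Dict Int Int × PySem.Set Int),
    (∀ v, p.1.getD v 0 = if v ∈ S' then 2 else if v ∈ X then 1 else 0) →
    p.2.Nodup → p.2.toFinset = X →
    (∀ v, (ws.foldl (fun acc voisin =>
        if acc.1.getD voisin 0 == 0 then (acc.1.insert voisin 1, PySem.Set.add acc.2 voisin)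
        else acc) p).1.getD v 0 =
      if v ∈ S' then 2 else if v ∈ X ∪ (ws.toFinset \ S') then 1 else 0) ∧
    (ws.foldl (fun acc voisin =>
        if acc.1.getD voisin 0 == 0 then (acc.1.insert voisin 1, PySem.Set.add acc.2 voisin)
        else acc) p).2.Nodup ∧
    (ws.foldl (fun acc voisin =>
        if acc.1.getD voisin 0 == 0 then (acc.1.insert voisin 1, PySem.Set.add acc.2 voisin)
        else acc) p).2.toFinset = X ∪ (ws.toFinset \ S') := by
  intro ws
  induction ws with
  | nil =>
    intro X p hst hnd htb
    simpa using ⟨hst, hnd, htb⟩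
  | cons w ws ih =>
    intro X p hst hnd htb
    simp only [List.foldl_cons]
    by_cases hw2 : w ∈ S'
    · have hcond : (p.1.getD w 0 == 0) = false := by simp [hst w, hw2]
      rw [hcond]
      simp only [Bool.false_eq_true, if_false]
      have hset : X ∪ (ws.toFinset \ S') = X ∪ ((w :: ws).toFinset \ S') := by
        ext x
        simp only [Finset.mem_union, Finset.mem_sdiff, List.toFinset_cons, Finset.mem_insert,
          List.mem_toFinset]
        constructor
        · rintro (h | ⟨h, h2⟩)
          · exact Or.inl h
          · exact Or.inr ⟨Or.inr h, h2⟩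
        · rintro (h | ⟨h | h, h2⟩)
          · exact Or.inl h
          · exact absurd (h ▸ hw2) h2
          · exact Or.inr ⟨h, h2⟩
      rw [← hset]
      exact ih X p hst hnd htb
    · by_cases hw1 : w ∈ X
      · have hcond : (p.1.getD w 0 == 0) = false := by simp [hst w, hw2, hw1]
        rw [hcond]
        simp only [Bool.false_eq_true, if_false]
        have hset : X ∪ (ws.toFinset \ S') = X ∪ ((w :: ws).toFinset \ S') := by
          ext x
          simp only [Finset.mem_union, Finset.mem_sdiff, List.toFinset_cons, Finset.mem_insert,
            List.mem_toFinset]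
          constructor
          · rintro (h | ⟨h, h2⟩)
            · exact Or.inl h
            · exact Or.inr ⟨Or.inr h, h2⟩
          · rintro (h | ⟨h | h, h2⟩)
            · exact Or.inl h
            · exact Or.inl (h ▸ hw1)
            · exact Or.inr ⟨h, h2⟩
        rw [← hset]
        exact ih X p hst hnd htb
      · have hcond : (p.1.getD w 0 == 0) = true := by simp [hst w, hw2, hw1]
        rw [hcond]
        simp only [if_true]
        have hwp2 : w ∉ p.2 := by
          rw [← List.mem_toFinset, htb]; exact hw1
        have h1' : ∀ v, (p.1.insert w 1).getD v 0
            = if v ∈ S' then 2 else if v ∈ insert w X then 1 else 0 := by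
          intro v
          rw [PySem.Dict.getD_insert]
          by_cases hv : v = w
          · subst hv; simp [hw2]
          · simp [hv, hst v, Finset.mem_insert]
        have h2' : (PySem.Set.add p.2 w).Nodup := PySem.Set.nodup_add _ _ hnd
        have h3' : (PySem.Set.add p.2 w).toFinset = insert w X := by
          rw [PySem.Set.add_of_not_mem hwp2, List.toFinset_append]
          simp [htb]
        have := ih (insert w X) (p.1.insert w 1, PySem.Set.add p.2 w) h1' h2' h3'
        have hset : insert w X ∪ (ws.toFinset \ S') = X ∪ ((w :: ws).toFinset \ S') := by
          ext x
          simp only [Finset.mem_union, Finset.mem_sdiff, Finset.mem_insert, List.toFinset_cons,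
            List.mem_toFinset]
          constructor
          · rintro (⟨h | h⟩ | ⟨h, h2⟩)
            · exact Or.inr ⟨Or.inl h, h ▸ hw2⟩
            · exact Or.inl h
            · exact Or.inr ⟨Or.inr h, h2⟩
          · rintro (h | ⟨h | h, h2⟩)
            · exact Or.inl (Or.inr h)
            · exact Or.inl (Or.inl h)
            · exact Or.inr ⟨h, h2⟩
        rw [← hset]
        exact this

lemma pvPropAll_desc (g : PySem.Dict Int (List Int)) (S' : Finset Int) :
    ∀ (nb : List Int) (X : Finset Int) (p : PySem.Dict Int Int × PySem.Set Int),
    (∀ v, p.1.getD v 0 = if v ∈ S' then 2 else if v ∈ X then 1 else 0) →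
    p.2.Nodup → p.2.toFinset = X →
    (∀ v, (nb.foldl (fun acc node => pvPropagate g node acc) p).1.getD v 0 =
      if v ∈ S' then 2 else if v ∈ X ∪ (pvN g nb.toFinset \ S') then 1 else 0) ∧
    (nb.foldl (fun acc node => pvPropagate g node acc) p).2.Nodup ∧
    (nb.foldl (fun acc node => pvPropagate g node acc) p).2.toFinset
      = X ∪ (pvN g nb.toFinset \ S') := by
  intro nb
  induction nb with
  | nil =>
    intro X p hst hnd htb
    simpa [pvN_empty] using ⟨hst, hnd, htb⟩
  | cons u us ih =>
    intro X p hst hnd htb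
    simp only [List.foldl_cons]
    obtain ⟨h1, h2, h3⟩ := pvPropFold_desc S' (g.getD u []) X p hst hnd htb
    have := ih (X ∪ ((g.getD u []).toFinset \ S')) (pvPropagate g u p)
      (by simpa [pvPropagate] using h1) (by simpa [pvPropagate] using h2)
      (by simpa [pvPropagate] using h3)
    have hset : (X ∪ ((g.getD u []).toFinset \ S')) ∪ (pvN g us.toFinset \ S')
        = X ∪ (pvN g (u :: us).toFinset \ S') := by
      rw [List.toFinset_cons, pvN_insert, Finset.union_sdiff_distrib, Finset.union_assoc]
    rw [← hset]
    exact this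

lemma pvSourceStep_desc (g : PySem.Dict Int (List Int)) (ch : List Int) (n : Nat)
    (state : PySem.Dict Int Int) (burned : PySem.Set Int)
    (hst : ∀ v, state.getD v 0 = if v ∈ pvS g ch n then 2 else if v ∈ pvF g ch n then 1 else 0)
    (hbnd : burned.Nodup) (hbset : burned.toFinset = pvS g ch n) :
    (∀ v, (pvSourceStep ch ((n : Int) + 1) state burned).1.getD v 0 =
      if v ∈ pvS g ch n ∪ (pvSrc ch n \ pvS g ch n) then 2
      else if v ∈ pvF g ch n then 1 else 0) ∧
    (pvSourceStep ch ((n : Int) + 1) state burned).2.1.Nodup ∧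
    (pvSourceStep ch ((n : Int) + 1) state burned).2.1.toFinset
      = pvS g ch n ∪ (pvSrc ch n \ pvS g ch n) ∧
    (pvSourceStep ch ((n : Int) + 1) state burned).2.2.Nodup ∧
    (pvSourceStep ch ((n : Int) + 1) state burned).2.2.toFinset = pvSrc ch n \ pvS g ch n := by
  simp only [pvSourceStep]
  by_cases hL : ((n : Int) + 1 ≤ (ch.length : Int))
  · have hn : n < ch.length := by omega
    rw [if_pos hL]
    have hidx : ((n : Int) + 1 - 1) = ((n : Nat) : Int) := by ring
    rw [hidx, PySem.List.pyGet?_natCast, List.getElem?_eq_getElem hn]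
    simp only [Option.getD_some]
    have hsrcset : pvSrc ch n = {ch[n]'hn} := by
      simp [pvSrc, List.getElem?_eq_getElem hn]
    by_cases hmem : ch[n]'hn ∈ pvS g ch n
    · have hY : pvSrc ch n \ pvS g ch n = ∅ := by
        rw [hsrcset, Finset.sdiff_eq_empty_iff_subset]
        simpa using hmem
      have hcond : (state.getD (ch[n]'hn) 0 != 2) = false := by
        simp [hst _, hmem]
      rw [hcond]
      simp only [Bool.false_eq_true, if_false, hY, Finset.union_empty]
      exact ⟨hst, hbnd, hbset, by simp [PySem.Set.empty], by simp [PySem.Set.empty]⟩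
    · have hY : pvSrc ch n \ pvS g ch n = {ch[n]'hn} := by
        rw [hsrcset]
        ext x
        simp only [Finset.mem_sdiff, Finset.mem_singleton]
        constructor
        · exact fun ⟨h, _⟩ => h
        · rintro rfl; exact ⟨rfl, hmem⟩
      have hcond : (state.getD (ch[n]'hn) 0 != 2) = true := by
        rw [hst, if_neg hmem]
        split_ifs <;> rfl
      rw [hcond]
      simp only [if_true]
      have hnb : ch[n]'hn ∉ burned := by
        rw [← List.mem_toFinset, hbset]; exact hmem
      refine ⟨?_, PySem.Set.nodup_add _ _ hbnd, ?_, ?_, ?_⟩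
      · intro v
        rw [PySem.Dict.getD_insert]
        by_cases hv : v = ch[n]'hn
        · subst hv
          simp [hY]
        · rw [if_neg hv, hst v, hY]
          by_cases hvS : v ∈ pvS g ch n <;> simp [hvS, hv]
      · rw [PySem.Set.add_of_not_mem hnb, List.toFinset_append, hbset, hY]
        simp
      · exact PySem.Set.nodup_add _ _ (by simp [PySem.Set.empty])
      · rw [hY]
        simp [PySem.Set.add, PySem.Set.empty]
  · rw [if_neg hL]
    have hn : ch.length ≤ n := by omega
    have hsrcset : pvSrc ch n = ∅ := by
      simp [pvSrc, List.getElem?_eq_none hn]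
    simp only [hsrcset, Finset.empty_sdiff, Finset.union_empty]
    exact ⟨hst, hbnd, hbset, by simp [PySem.Set.empty], by simp [PySem.Set.empty]⟩

lemma pvBurnStep_inv (g : PySem.Dict Int (List Int)) (ch : List Int) (n : Nat)
    (state : PySem.Dict Int Int) (newBurned burned toBurn : PySem.Set Int)
    (hst : ∀ v, state.getD v 0 =
      if v ∈ pvS g ch n ∪ (pvSrc ch n \ pvS g ch n) then 2
      else if v ∈ pvF g ch n then 1 else 0)
    (_hnnd : newBurned.Nodup) (hnset : newBurned.toFinset = pvSrc ch n \ pvS g ch n)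
    (hbnd : burned.Nodup) (hbset : burned.toFinset = pvS g ch n ∪ (pvSrc ch n \ pvS g ch n))
    (_htnd : toBurn.Nodup) (htset : toBurn.toFinset = pvF g ch n) :
    pvInvA g ch (n + 1)
      (pvBurnStep g state newBurned burned toBurn).1
      (pvBurnStep g state newBurned burned toBurn).2.1
      (pvBurnStep g state newBurned burned toBurn).2.2 := by
  have hSsucc : pvS g ch (n + 1) = (pvS g ch n ∪ (pvSrc ch n \ pvS g ch n)) ∪ pvF g ch n := by
    rw [pvS_succ, pvNB_succ, Finset.union_assoc]
  have hNBset : pvNB g ch (n + 1) = (pvSrc ch n \ pvS g ch n) ∪ pvF g ch n := pvNB_succ g ch n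
  simp only [pvBurnStep]
  by_cases htb0 : toBurn = ([] : List Int)
  · have hcond : (toBurn != ([] : List Int)) = false := by simp [htb0]
    rw [hcond]
    simp only [Bool.false_eq_true, if_false]
    have hF0 : pvF g ch n = ∅ := by rw [← htset, htb0]; simp
    have hst' : ∀ v, state.getD v 0 =
        if v ∈ pvS g ch (n + 1) then 2 else if v ∈ (∅ : Finset Int) then 1 else 0 := by
      intro v
      rw [hst v, hSsucc, hF0]
      simp
    obtain ⟨p1, p2, p3⟩ := pvPropAll_desc g (pvS g ch (n + 1)) newBurned ∅
      (state, (PySem.Set.empty : PySem.Set Int)) hst'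
      (by simp [PySem.Set.empty]) (by simp [PySem.Set.empty])
    have hFset : (∅ ∪ (pvN g newBurned.toFinset \ pvS g ch (n + 1))) = pvF g ch (n + 1) := by
      rw [Finset.empty_union, hnset, pvF_succ, hNBset, hF0, Finset.union_empty]
    refine ⟨?_, hbnd, ?_, p2, ?_⟩
    · intro v; rw [p1 v, hFset]
    · rw [hbset, hSsucc, hF0, Finset.union_empty]
    · rw [p3, hFset]
  · have hcond : (toBurn != ([] : List Int)) = true := by simp [htb0]
    rw [hcond]
    simp only [if_true]
    have hstf : ∀ v, (toBurn.foldl (fun st node => st.insert node (2 : Int)) state).getD v 0 =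
        if v ∈ pvS g ch (n + 1) then 2 else if v ∈ (∅ : Finset Int) then 1 else 0 := by
      intro v
      rw [pvGetD_foldl_insert_const]
      by_cases hvF : v ∈ pvF g ch n
      · have hvt : v ∈ toBurn := by rw [← List.mem_toFinset, htset]; exact hvF
        rw [if_pos hvt, hSsucc]
        simp [hvF]
      · have hvt : v ∉ toBurn := by rw [← List.mem_toFinset, htset]; exact hvF
        rw [if_neg hvt, hst v, hSsucc]
        by_cases hvS : v ∈ pvS g ch n ∪ (pvSrc ch n \ pvS g ch n) <;> simp [hvF]
    have hnset' : (PySem.Set.union newBurned toBurn).toFinset = pvNB g ch (n + 1) := by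
      ext x
      simp only [List.mem_toFinset, PySem.Set.mem_union, hNBset, Finset.mem_union]
      rw [← List.mem_toFinset, ← List.mem_toFinset, hnset, htset]
    obtain ⟨p1, p2, p3⟩ := pvPropAll_desc g (pvS g ch (n + 1)) (PySem.Set.union newBurned toBurn) ∅
      (toBurn.foldl (fun st node => st.insert node (2 : Int)) state,
        (PySem.Set.empty : PySem.Set Int)) hstf
      (by simp [PySem.Set.empty]) (by simp [PySem.Set.empty])
    have hFset : (∅ ∪ (pvN g (PySem.Set.union newBurned toBurn).toFinset \ pvS g ch (n + 1)))
        = pvF g ch (n + 1) := by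
      rw [Finset.empty_union, hnset', pvF_succ]
    refine ⟨?_, PySem.Set.nodup_union _ _ hbnd, ?_, p2, ?_⟩
    · intro v; rw [p1 v, hFset]
    · ext x
      simp only [List.mem_toFinset, PySem.Set.mem_union, hSsucc, Finset.mem_union]
      rw [← List.mem_toFinset, ← List.mem_toFinset, hbset, htset]
      simp only [Finset.mem_union, Finset.mem_sdiff]
    · rw [p3, hFset]

lemma pvIterA_inv (g : PySem.Dict Int (List Int)) (ch : List Int) (n : Nat)
    (state : PySem.Dict Int Int) (burned toBurn : PySem.Set Int)
    (h : pvInvA g ch n state burned toBurn) :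
    pvInvA g ch (n + 1)
      (pvIterA g ch ((n : Int) + 1) state burned toBurn).1
      (pvIterA g ch ((n : Int) + 1) state burned toBurn).2.1
      (pvIterA g ch ((n : Int) + 1) state burned toBurn).2.2 := by
  obtain ⟨hst, hbnd, hbset, htnd, htset⟩ := h
  obtain ⟨h1, h2, h3, h4, h5⟩ := pvSourceStep_desc g ch n state burned hst hbnd hbset
  exact pvBurnStep_inv g ch n _ _ _ _ h1 h4 h5 h2 h3 htnd htset

lemma pvRunA (g : PySem.Dict Int (List Int)) (ch : List Int)
    (hknd : g.keys.Nodup)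
    (T : Nat) (hT : g.keys.toFinset ⊆ pvS g ch T)
    (hmin : ∀ m, m < T → ¬ g.keys.toFinset ⊆ pvS g ch m)
    (hsub : ∀ n, n ≤ T → pvS g ch n ⊆ g.keys.toFinset) :
    ∀ fuel n (state : PySem.Dict Int Int) (burned toBurn : PySem.Set Int),
      pvInvA g ch n state burned toBurn → n ≤ T → T + 1 ≤ fuel + n →
      pvLoopA g ch (g.size : Int) fuel state burned toBurn (n : Int) = (T : Int) := by
  intro fuel
  induction fuel with
  | zero => intro n state burned toBurn _ hnT hfuel; omega
  | succ fuel ih =>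
    intro n state burned toBurn hinv hnT hfuel
    have hSsub : pvS g ch n ⊆ g.keys.toFinset := hsub n hnT
    have hcard : PySem.Set.len burned = ((pvS g ch n).card : Int) := by
      show ((burned.length : Int)) = _
      rw [← List.toFinset_card_of_nodup hinv.2.1, hinv.2.2.1]
    have hsize : g.size = g.keys.length := by
      simp [PySem.Dict.size, PySem.Dict.keys]
    have hkcard : g.keys.toFinset.card = g.size := by
      rw [List.toFinset_card_of_nodup hknd, hsize]
    simp only [pvLoopA]
    by_cases hlt : n < T
    · have hne : pvS g ch n ≠ g.keys.toFinset := by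
        intro he
        exact hmin n hlt (by rw [he])
      have hguard : PySem.Set.len burned < (g.size : Int) := by
        rw [hcard]
        have h1 : (pvS g ch n).card < g.keys.toFinset.card :=
          Finset.card_lt_card (Finset.ssubset_iff_subset_ne.mpr ⟨hSsub, hne⟩)
        rw [hkcard] at h1
        exact_mod_cast h1
      rw [if_pos hguard]
      have hstep := pvIterA_inv g ch n state burned toBurn hinv
      have hcast : ((n : Int) + 1) = (((n + 1 : Nat)) : Int) := by push_cast; ring
      rw [hcast]
      exact ih (n + 1) _ _ _ (by rw [← hcast]; exact hstep) (by omega) (by omega)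
    · have hnT' : n = T := by omega
      subst hnT'
      have he : pvS g ch n = g.keys.toFinset := Finset.Subset.antisymm hSsub hT
      have hguard : ¬ (PySem.Set.len burned < (g.size : Int)) := by
        rw [hcard, he]
        have : g.keys.toFinset.card = g.size := hkcard
        omega
      rw [if_neg hguard]

-- ===== B-side lemmas =====

-- "the dictionary only ever improves": every present entry stays present with a value ≤
def pvDle (b b' : PySem.Dict Int Int) : Prop :=
  ∀ v t, b.get? v = some t → ∃ t', b'.get? v = some t' ∧ t' ≤ t

lemma pvDle_refl (b : PySem.Dict Int Int) : pvDle b b :=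
  fun _ t h => ⟨t, h, le_refl t⟩

lemma pvDle_trans {a b c : PySem.Dict Int Int} (h1 : pvDle a b) (h2 : pvDle b c) :
    pvDle a c := by
  intro v t h
  obtain ⟨t', hb, hle⟩ := h1 v t h
  obtain ⟨t'', hc, hle'⟩ := h2 v t' hb
  exact ⟨t'', hc, le_trans hle' hle⟩

-- every stored burn time is achievable: value n means the vertex is burnt by iteration n
def pvSound (g : PySem.Dict Int (List Int)) (ch : List Int) (b : PySem.Dict Int Int) : Prop :=
  b.keys.Nodup ∧
  ∀ v t, b.get? v = some t → v ∈ g.keys ∧ ∃ n : Nat, t = (n : Int) ∧ v ∈ pvS g ch n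

lemma pvRelaxEdge_dle (t : Int) (ac : PySem.Dict Int Int × Bool) (w : Int) :
    pvDle ac.1 (pvRelaxEdge t ac w).1 := by
  intro v tv hv
  unfold pvRelaxEdge
  cases hw : ac.1.get? w with
  | none =>
    simp only
    rw [PySem.Dict.get?_insert]
    by_cases hvw : v = w
    · rw [hvw, hw] at hv; cases hv
    · rw [if_neg hvw]; exact ⟨tv, hv, le_refl tv⟩
  | some tw =>
    simp only
    by_cases hlt : t < tw
    · rw [if_pos hlt]
      simp only
      rw [PySem.Dict.get?_insert]
      by_cases hvw : v = w
      · subst hvw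
        rw [hv] at hw
        exact ⟨t, by rw [if_pos rfl], by cases hw; omega⟩
      · rw [if_neg hvw]; exact ⟨tv, hv, le_refl tv⟩
    · rw [if_neg hlt]; exact ⟨tv, hv, le_refl tv⟩

lemma pvRelaxEdge_get (t : Int) (ac : PySem.Dict Int Int × Bool) (w : Int) :
    ∃ t', (pvRelaxEdge t ac w).1.get? w = some t' ∧ t' ≤ t := by
  unfold pvRelaxEdge
  cases hw : ac.1.get? w with
  | none => exact ⟨t, PySem.Dict.get?_insert_self _ _ _, le_refl t⟩
  | some tw =>
    simp only
    by_cases hlt : t < tw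
    · rw [if_pos hlt]; exact ⟨t, PySem.Dict.get?_insert_self _ _ _, le_refl t⟩
    · rw [if_neg hlt]; exact ⟨tw, hw, by omega⟩

lemma pvEdgeFold_dle (t : Int) (ws : List Int) :
    ∀ ac : PySem.Dict Int Int × Bool,
      pvDle ac.1 ((ws.foldl (pvRelaxEdge t) ac).1) ∧
      ∀ w ∈ ws, ∃ t', ((ws.foldl (pvRelaxEdge t) ac).1).get? w = some t' ∧ t' ≤ t := by
  induction ws with
  | nil => intro ac; exact ⟨pvDle_refl _, by simp⟩
  | cons w ws ih =>
    intro ac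
    rw [List.foldl_cons]
    obtain ⟨ihd, ihw⟩ := ih (pvRelaxEdge t ac w)
    refine ⟨pvDle_trans (pvRelaxEdge_dle t ac w) ihd, ?_⟩
    intro x hx
    rcases List.mem_cons.mp hx with rfl | hx'
    · obtain ⟨t', hg, hle⟩ := pvRelaxEdge_get t ac x
      obtain ⟨t'', hg', hle'⟩ := ihd x t' hg
      exact ⟨t'', hg', le_trans hle' hle⟩
    · exact ihw x hx'

lemma pvRelaxVertex_dle (ac : PySem.Dict Int Int × Bool) (p : Int × List Int) :
    pvDle ac.1 (pvRelaxVertex ac p).1 := by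
  unfold pvRelaxVertex
  cases h : ac.1.get? p.1 with
  | none => exact pvDle_refl _
  | some tu => exact (pvEdgeFold_dle (tu + 1) p.2 ac).1

lemma pvRoundFold_dle (l : List (Int × List Int)) :
    ∀ ac : PySem.Dict Int Int × Bool, pvDle ac.1 ((l.foldl pvRelaxVertex ac).1) := by
  induction l with
  | nil => intro ac; exact pvDle_refl _
  | cons p l ih =>
    intro ac
    rw [List.foldl_cons]
    exact pvDle_trans (pvRelaxVertex_dle ac p) (ih (pvRelaxVertex ac p))

-- soundness is preserved by relaxation
lemma pvRelaxEdge_sound (g : PySem.Dict Int (List Int)) (ch : List Int)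
    (t : Int) (ac : PySem.Dict Int Int × Bool) (w : Int)
    (hs : pvSound g ch ac.1)
    (hw : w ∈ g.keys ∧ ∃ n : Nat, t = (n : Int) ∧ w ∈ pvS g ch n) :
    pvSound g ch (pvRelaxEdge t ac w).1 := by
  have hins : pvSound g ch (ac.1.insert w t) := by
    refine ⟨PySem.Dict.nodup_keys_insert _ _ _ hs.1, ?_⟩
    intro v tv hv
    rw [PySem.Dict.get?_insert] at hv
    by_cases hvw : v = w
    · rw [if_pos hvw] at hv
      cases hv
      exact hvw ▸ hw
    · rw [if_neg hvw] at hv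
      exact hs.2 v tv hv
  unfold pvRelaxEdge
  cases hg : ac.1.get? w with
  | none => exact hins
  | some tw =>
    simp only
    by_cases hlt : t < tw
    · rw [if_pos hlt]; exact hins
    · rw [if_neg hlt]; exact hs

lemma pvEdgeFold_sound (g : PySem.Dict Int (List Int)) (ch : List Int)
    (t : Int) (ws : List Int)
    (hws : ∀ w ∈ ws, w ∈ g.keys ∧ ∃ n : Nat, t = (n : Int) ∧ w ∈ pvS g ch n) :
    ∀ ac : PySem.Dict Int Int × Bool, pvSound g ch ac.1 →
      pvSound g ch ((ws.foldl (pvRelaxEdge t) ac).1) := by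
  induction ws with
  | nil => intro ac hs; exact hs
  | cons w ws ih =>
    intro ac hs
    rw [List.foldl_cons]
    exact ih (fun x hx => hws x (List.mem_cons_of_mem _ hx)) _
      (pvRelaxEdge_sound g ch t ac w hs (hws w List.mem_cons_self))

lemma pvRelaxVertex_sound (g : PySem.Dict Int (List Int)) (ch : List Int)
    (hadj : ∀ k ∈ g.keys, ∀ w ∈ g.getD k [], w ∈ g.keys)
    (ac : PySem.Dict Int Int × Bool) (p : Int × List Int)
    (hp : p.2 = g.getD p.1 [])
    (hs : pvSound g ch ac.1) :
    pvSound g ch (pvRelaxVertex ac p).1 := by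
  unfold pvRelaxVertex
  cases h : ac.1.get? p.1 with
  | none => exact hs
  | some tu =>
    obtain ⟨hu, n, rfl, hupS⟩ := hs.2 p.1 tu h
    refine pvEdgeFold_sound g ch _ p.2 ?_ ac hs
    intro w hw
    rw [hp] at hw
    refine ⟨hadj p.1 hu w hw, n + 1, by push_cast; ring, ?_⟩
    apply pvN_S_subset g ch n
    simp only [pvN, Finset.mem_biUnion]
    exact ⟨p.1, hupS, List.mem_toFinset.mpr hw⟩

lemma pvRoundFold_sound (g : PySem.Dict Int (List Int)) (ch : List Int)
    (hadj : ∀ k ∈ g.keys, ∀ w ∈ g.getD k [], w ∈ g.keys) :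
    ∀ (l : List (Int × List Int)), (∀ p ∈ l, p.2 = g.getD p.1 []) →
    ∀ ac : PySem.Dict Int Int × Bool, pvSound g ch ac.1 →
      pvSound g ch ((l.foldl pvRelaxVertex ac).1) := by
  intro l
  induction l with
  | nil => intro _ ac hs; exact hs
  | cons p l ih =>
    intro hl ac hs
    rw [List.foldl_cons]
    exact ih (fun q hq => hl q (List.mem_cons_of_mem _ hq)) _
      (pvRelaxVertex_sound g ch hadj ac p (hl p List.mem_cons_self) hs)

-- progress: relaxing a full round pushes every neighbour below its owner's time + 1
lemma pvRoundProgress (g : PySem.Dict Int (List Int)) (hknd : g.keys.Nodup)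
    (bt : PySem.Dict Int Int) (u : Int) (tu : Int)
    (hu : bt.get? u = some tu) (huk : u ∈ g.keys) :
    ∀ w ∈ g.getD u [], ∃ t',
      ((g.items.foldl pvRelaxVertex (bt, false)).1).get? w = some t' ∧ t' ≤ tu + 1 := by
  intro w hw
  have hpair : (u, g.getD u []) ∈ g.items := by
    rw [PySem.Dict.items_eq_map_keys g hknd []]
    exact List.mem_map.mpr ⟨u, huk, rfl⟩
  obtain ⟨l1, l2, hsplit⟩ := List.append_of_mem hpair
  rw [hsplit, List.foldl_append, List.foldl_cons]
  set ac1 := l1.foldl pvRelaxVertex (bt, false) with hac1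
  obtain ⟨tu1, hg1, hle1⟩ := pvRoundFold_dle l1 (bt, false) u tu hu
  have hstep : ∃ t', ((pvRelaxVertex ac1 (u, g.getD u [])).1).get? w = some t' ∧ t' ≤ tu1 + 1 := by
    unfold pvRelaxVertex
    simp only
    rw [hg1]
    exact (pvEdgeFold_dle (tu1 + 1) (g.getD u []) ac1).2 w hw
  obtain ⟨t', hg2, hle2⟩ := hstep
  obtain ⟨t'', hg3, hle3⟩ := pvRoundFold_dle l2 _ w t' hg2
  exact ⟨t'', hg3, by omega⟩

-- the changed flag: a round reporting no change really changed nothing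
lemma pvRelaxEdge_false (t : Int) (ac : PySem.Dict Int Int × Bool) (w : Int)
    (h : (pvRelaxEdge t ac w).2 = false) : pvRelaxEdge t ac w = ac := by
  cases hw : ac.1.get? w with
  | none => unfold pvRelaxEdge at h; simp only [hw] at h; exact Bool.noConfusion h
  | some tw =>
    unfold pvRelaxEdge at h ⊢
    simp only [hw] at h ⊢
    by_cases hlt : t < tw
    · rw [if_pos hlt] at h; simp at h
    · rw [if_neg hlt]

lemma pvEdgeFold_false (t : Int) (ws : List Int) :
    ∀ ac : PySem.Dict Int Int × Bool,
      (ws.foldl (pvRelaxEdge t) ac).2 = false → ws.foldl (pvRelaxEdge t) ac = ac := by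
  induction ws with
  | nil => intro ac _; rfl
  | cons w ws ih =>
    intro ac h
    rw [List.foldl_cons] at h ⊢
    have h1 := ih (pvRelaxEdge t ac w) h
    rw [h1] at h ⊢
    rw [pvRelaxEdge_false t ac w h]

lemma pvRelaxVertex_false (ac : PySem.Dict Int Int × Bool) (p : Int × List Int)
    (h : (pvRelaxVertex ac p).2 = false) : pvRelaxVertex ac p = ac := by
  cases hu : ac.1.get? p.1 with
  | none => unfold pvRelaxVertex; simp only [hu]
  | some tu =>
    unfold pvRelaxVertex at h ⊢
    simp only [hu] at h ⊢
    exact pvEdgeFold_false (tu + 1) p.2 ac h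

lemma pvRoundFold_false (l : List (Int × List Int)) :
    ∀ ac : PySem.Dict Int Int × Bool,
      (l.foldl pvRelaxVertex ac).2 = false → l.foldl pvRelaxVertex ac = ac := by
  induction l with
  | nil => intro ac _; rfl
  | cons p l ih =>
    intro ac h
    rw [List.foldl_cons] at h ⊢
    have h1 := ih (pvRelaxVertex ac p) h
    rw [h1] at h ⊢
    rw [pvRelaxVertex_false ac p h]

-- break-free version of the relaxation loop (the early exit is semantically invisible)
def pvRoundsP (g : PySem.Dict Int (List Int)) : Nat → PySem.Dict Int Int → PySem.Dict Int Int
  | 0, bt => bt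
  | fuel + 1, bt => pvRoundsP g fuel ((g.items.foldl pvRelaxVertex (bt, false)).1)

lemma pvRoundsP_fix (g : PySem.Dict Int (List Int)) (bt : PySem.Dict Int Int)
    (h : (g.items.foldl pvRelaxVertex (bt, false)).1 = bt) :
    ∀ fuel, pvRoundsP g fuel bt = bt := by
  intro fuel
  induction fuel with
  | zero => rfl
  | succ fuel ih => rw [pvRoundsP, h, ih]

lemma pvRoundsB_eq (g : PySem.Dict Int (List Int)) :
    ∀ fuel bt, pvRoundsB g fuel bt = pvRoundsP g fuel bt := by
  intro fuel
  induction fuel with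
  | zero => intro bt; rfl
  | succ fuel ih =>
    intro bt
    rw [pvRoundsB, pvRoundsP]
    by_cases hc : (g.items.foldl pvRelaxVertex (bt, false)).2 = true
    · rw [if_pos hc]
      exact ih _
    · rw [if_neg hc]
      have hfix := pvRoundFold_false g.items (bt, false) (by simpa using hc)
      have h1 : (g.items.foldl pvRelaxVertex (bt, false)).1 = bt := by rw [hfix]
      rw [h1, pvRoundsP_fix g bt h1 fuel]

lemma pvRoundsP_succ_right (g : PySem.Dict Int (List Int)) :
    ∀ r bt, pvRoundsP g (r + 1) bt
      = (g.items.foldl pvRelaxVertex (pvRoundsP g r bt, false)).1 := by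
  intro r
  induction r with
  | zero => intro bt; rfl
  | succ r ih =>
    intro bt
    rw [pvRoundsP, ih, pvRoundsP]

lemma pvRoundsP_dle (g : PySem.Dict Int (List Int)) :
    ∀ r bt, pvDle bt (pvRoundsP g r bt) := by
  intro r
  induction r with
  | zero => intro bt; exact pvDle_refl _
  | succ r ih =>
    intro bt
    rw [pvRoundsP]
    exact pvDle_trans (pvRoundFold_dle g.items (bt, false)) (ih _)

lemma pvRoundsP_sound (g : PySem.Dict Int (List Int)) (ch : List Int)
    (hadj : ∀ k ∈ g.keys, ∀ w ∈ g.getD k [], w ∈ g.keys) (hknd : g.keys.Nodup) :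
    ∀ r bt, pvSound g ch bt → pvSound g ch (pvRoundsP g r bt) := by
  intro r
  induction r with
  | zero => intro bt hs; exact hs
  | succ r ih =>
    intro bt hs
    rw [pvRoundsP]
    refine ih _ (pvRoundFold_sound g ch hadj g.items ?_ (bt, false) hs)
    intro p hp
    rw [PySem.Dict.items_eq_map_keys g hknd []] at hp
    obtain ⟨k, -, rfl⟩ := List.mem_map.mp hp
    rfl

-- the initial dict: each step keeps existing entries at most as large
lemma pvInitStep_dle (g : PySem.Dict Int (List Int)) (bt : PySem.Dict Int Int)
    (p : Int × Int) :
    pvDle bt (if g.contains p.2 then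
        match bt.get? p.2 with
        | none => bt.insert p.2 (p.1 + 1)
        | some tb => if p.1 + 1 < tb then bt.insert p.2 (p.1 + 1) else bt
      else bt) := by
  by_cases hc : g.contains p.2
  · rw [if_pos hc]
    cases hg : bt.get? p.2 with
    | none =>
      intro v t hv
      simp only
      rw [PySem.Dict.get?_insert]
      by_cases hvp : v = p.2
      · rw [hvp, hg] at hv; cases hv
      · rw [if_neg hvp]; exact ⟨t, hv, le_refl t⟩
    | some tb =>
      simp only
      by_cases hlt : p.1 + 1 < tb
      · rw [if_pos hlt]
        intro v t hv
        rw [PySem.Dict.get?_insert]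
        by_cases hvp : v = p.2
        · subst hvp
          rw [hv] at hg
          exact ⟨p.1 + 1, by rw [if_pos rfl], by cases hg; omega⟩
        · rw [if_neg hvp]; exact ⟨t, hv, le_refl t⟩
      · rw [if_neg hlt]; exact pvDle_refl _
  · rw [if_neg hc]; exact pvDle_refl _

lemma pvInitFold_dle (g : PySem.Dict Int (List Int)) (l : List (Int × Int)) :
    ∀ bt, pvDle bt (l.foldl (fun bt p =>
      if g.contains p.2 then
        match bt.get? p.2 with
        | none => bt.insert p.2 (p.1 + 1)
        | some tb => if p.1 + 1 < tb then bt.insert p.2 (p.1 + 1) else bt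
      else bt) bt) := by
  induction l with
  | nil => intro bt; exact pvDle_refl _
  | cons p l ih =>
    intro bt
    rw [List.foldl_cons]
    exact pvDle_trans (pvInitStep_dle g bt p) (ih _)

-- the initial dict is sound
lemma pvInitFold_sound (g : PySem.Dict Int (List Int)) (ch : List Int) :
    ∀ (l : List (Int × Int)),
      (∀ p ∈ l, ∃ k : Nat, ∃ hk : k < ch.length, p = ((k : Int), ch[k])) →
      ∀ bt, pvSound g ch bt →
        pvSound g ch (l.foldl (fun bt p =>
          if g.contains p.2 then
            match bt.get? p.2 with
            | none => bt.insert p.2 (p.1 + 1)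
            | some tb => if p.1 + 1 < tb then bt.insert p.2 (p.1 + 1) else bt
          else bt) bt) := by
  intro l
  induction l with
  | nil => intro _ bt hs; exact hs
  | cons p l ih =>
    intro hl bt hs
    rw [List.foldl_cons]
    refine ih (fun q hq => hl q (List.mem_cons_of_mem _ hq)) _ ?_
    obtain ⟨k, hk, rfl⟩ := hl p List.mem_cons_self
    by_cases hc : g.contains ch[k]
    · have hins : pvSound g ch (bt.insert ch[k] ((k : Int) + 1)) := by
        refine ⟨PySem.Dict.nodup_keys_insert _ _ _ hs.1, ?_⟩
        intro v tv hv
        rw [PySem.Dict.get?_insert] at hv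
        by_cases hvp : v = ch[k]
        · rw [if_pos hvp] at hv
          cases hv
          refine ⟨hvp ▸ (PySem.Dict.contains_iff_mem_keys _ _).mp hc, k + 1, by push_cast; ring, ?_⟩
          subst hvp
          apply pvSrc_subset_S g ch hk
          simp [pvSrc, List.getElem?_eq_getElem hk]
        · rw [if_neg hvp] at hv
          exact hs.2 v tv hv
      simp only [if_pos hc]
      cases hg : bt.get? ch[k] with
      | none => exact hins
      | some tb =>
        simp only
        by_cases hlt : (k : Int) + 1 < tb
        · rw [if_pos hlt]; exact hins
        · rw [if_neg hlt]; exact hs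
    · simp only [if_neg hc]; exact hs

-- every valid source chemin[j] gets an initial entry ≤ j+1
lemma pvInitFold_low (g : PySem.Dict Int (List Int)) (ch : List Int)
    (j : Nat) (hj : j < ch.length) (hjk : g.contains ch[j] = true) :
    ∃ t, ((PySem.List.enumerate ch).foldl (fun bt p =>
        if g.contains p.2 then
          match bt.get? p.2 with
          | none => bt.insert p.2 (p.1 + 1)
          | some tb => if p.1 + 1 < tb then bt.insert p.2 (p.1 + 1) else bt
        else bt) PySem.Dict.empty).get? ch[j] = some t ∧ t ≤ (j : Int) + 1 := by
  have hmem : ((j : Int), ch[j]) ∈ PySem.List.enumerate ch := by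
    rw [PySem.List.mem_enumerate_iff]
    exact ⟨j, hj, by simp⟩
  obtain ⟨l1, l2, hsplit⟩ := List.append_of_mem hmem
  rw [hsplit, List.foldl_append, List.foldl_cons]
  set bt1 := l1.foldl (fun bt p =>
      if g.contains p.2 then
        match bt.get? p.2 with
        | none => bt.insert p.2 (p.1 + 1)
        | some tb => if p.1 + 1 < tb then bt.insert p.2 (p.1 + 1) else bt
      else bt) PySem.Dict.empty with hbt1
  have hstep : ∃ t, ((if g.contains ch[j] then
        match bt1.get? ch[j] with
        | none => bt1.insert ch[j] ((j : Int) + 1)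
        | some tb => if (j : Int) + 1 < tb then bt1.insert ch[j] ((j : Int) + 1) else bt1
      else bt1) : PySem.Dict Int Int).get? ch[j] = some t ∧ t ≤ (j : Int) + 1 := by
    rw [if_pos hjk]
    cases hg : bt1.get? ch[j] with
    | none => exact ⟨(j : Int) + 1, PySem.Dict.get?_insert_self _ _ _, le_refl _⟩
    | some tb =>
      simp only
      by_cases hlt : (j : Int) + 1 < tb
      · rw [if_pos hlt]; exact ⟨(j : Int) + 1, PySem.Dict.get?_insert_self _ _ _, le_refl _⟩
      · rw [if_neg hlt]; exact ⟨tb, hg, by omega⟩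
  obtain ⟨t, hg, hle⟩ := hstep
  obtain ⟨t', hg', hle'⟩ := pvInitFold_dle g l2 _ ch[j] t hg
  exact ⟨t', hg', by omega⟩

-- the upper bound: after r relaxation rounds every vertex burnt by iteration n ≤ r+1
-- (and n ≤ T, so all sources involved are valid) has a stored time ≤ n
lemma pvUpper (g : PySem.Dict Int (List Int)) (ch : List Int) (T : Nat)
    (hknd : g.keys.Nodup)
    (hcT : ∀ (j : Nat) (hj : j < ch.length), j < T → ch[j]'hj ∈ g.keys)
    (hsub : ∀ n, n ≤ T → pvS g ch n ⊆ g.keys.toFinset) :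
    ∀ r (n : Nat), n ≤ r + 1 → n ≤ T → ∀ v ∈ pvS g ch n,
      ∃ t, (pvRoundsP g r ((PySem.List.enumerate ch).foldl (fun bt p =>
          if g.contains p.2 then
            match bt.get? p.2 with
            | none => bt.insert p.2 (p.1 + 1)
            | some tb => if p.1 + 1 < tb then bt.insert p.2 (p.1 + 1) else bt
          else bt) PySem.Dict.empty)).get? v = some t ∧ t ≤ (n : Int) := by
  set bt0 := (PySem.List.enumerate ch).foldl (fun bt p =>
      if g.contains p.2 then
        match bt.get? p.2 with
        | none => bt.insert p.2 (p.1 + 1)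
        | some tb => if p.1 + 1 < tb then bt.insert p.2 (p.1 + 1) else bt
      else bt) PySem.Dict.empty with hbt0
  have hsrc_case : ∀ (m : Nat), m < T → ∀ v ∈ pvSrc ch m,
      ∃ t, bt0.get? v = some t ∧ t ≤ (m : Int) + 1 := by
    intro m hmT v hv
    cases hsome : ch[m]? with
    | none => simp [pvSrc, hsome] at hv
    | some y =>
      simp only [pvSrc, hsome, Finset.mem_singleton] at hv
      have hm : m < ch.length := (List.getElem?_eq_some_iff.mp hsome).1
      have hy : ch[m] = y := Option.some.inj ((List.getElem?_eq_getElem hm) ▸ hsome)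
      subst hv
      rw [← hy]
      exact pvInitFold_low g ch m hm
        ((PySem.Dict.contains_iff_mem_keys _ _).mpr (hcT m hm hmT))
  intro r
  induction r with
  | zero =>
    intro n hn hT v hv
    interval_cases n
    · simp [pvS_zero] at hv
    · have hv' := pvS_succ_sub g ch 0 hv
      rw [pvS_zero, pvN_empty, Finset.union_empty, Finset.union_empty] at hv'
      obtain ⟨t, hg, hle⟩ := hsrc_case 0 (by omega) v hv'
      exact ⟨t, hg, by simpa using hle⟩
  | succ r ih =>
    intro n hn hT v hv
    rw [pvRoundsP_succ_right]
    by_cases hn' : n ≤ r + 1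
    · obtain ⟨t, hg, hle⟩ := ih n hn' hT v hv
      obtain ⟨t', hg', hle'⟩ := pvRoundFold_dle g.items (pvRoundsP g r bt0, false) v t hg
      exact ⟨t', hg', by omega⟩
    · have hneq : n = r + 2 := by omega
      subst hneq
      have hv' := pvS_succ_sub g ch (r + 1) hv
      rcases Finset.mem_union.mp hv' with h' | h'
      · rcases Finset.mem_union.mp h' with hs | hs
        · -- a fresh source at iteration r+2 (valid because r+2 ≤ T)
          obtain ⟨t, hg, hle⟩ := hsrc_case (r + 1) (by omega) v hs
          obtain ⟨t', hg', hle'⟩ := pvRoundsP_dle g r bt0 v t hg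
          obtain ⟨t'', hg'', hle''⟩ :=
            pvRoundFold_dle g.items (pvRoundsP g r bt0, false) v t' hg'
          refine ⟨t'', hg'', by push_cast; omega⟩
        · -- already burnt one iteration earlier
          obtain ⟨t, hg, hle⟩ := ih (r + 1) (by omega) (by omega) v hs
          obtain ⟨t', hg', hle'⟩ := pvRoundFold_dle g.items (pvRoundsP g r bt0, false) v t hg
          refine ⟨t', hg', by push_cast at hle ⊢; omega⟩
      · -- a neighbour of a vertex burnt one iteration earlier: this round relaxes it
        simp only [pvN, Finset.mem_biUnion] at h'
        obtain ⟨u, huS, hvadj⟩ := h'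
        obtain ⟨tu, hgu, hleu⟩ := ih (r + 1) (by omega) (by omega) u huS
        have huk : u ∈ g.keys :=
          List.mem_toFinset.mp (hsub (r + 1) (by omega) huS)
        obtain ⟨t', hg', hle'⟩ := pvRoundProgress g hknd (pvRoundsP g r bt0) u tu hgu huk v
          (List.mem_toFinset.mp hvadj)
        refine ⟨t', hg', by push_cast at hleu ⊢; omega⟩

-- ===== final assembly =====

set_option maxHeartbeats 1000000 in
lemma pvMain (graphe : List (Int × List Int)) (chemin : List Int)
    (hpre : Pre_iterations_brulage_totale graphe chemin) :
    iterations_brulage_totale graphe chemin = iterations_brulage_totale_alt graphe chemin := by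
  obtain ⟨hadj, hb, hinv⟩ := hpre
  set g := PySem.Dict.ofList graphe with hg
  have hknd : g.keys.Nodup := PySem.Dict.nodup_keys_ofList graphe
  have hex : ∃ n, g.keys.toFinset ⊆ pvS g chemin n := ⟨_, hb⟩
  obtain ⟨T, hT, hmin, hTle, hleast⟩ :
      ∃ T : Nat, g.keys.toFinset ⊆ pvS g chemin T ∧
        (∀ m, m < T → ¬ g.keys.toFinset ⊆ pvS g chemin m) ∧
        T ≤ chemin.length + g.size ∧
        (∀ m, g.keys.toFinset ⊆ pvS g chemin m → T ≤ m) :=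
    ⟨Nat.find hex, Nat.find_spec hex, fun m hm => Nat.find_min hex hm,
      Nat.find_min' hex hb, fun m hm => Nat.find_min' hex hm⟩
  have hcT : ∀ (j : Nat) (hj : j < chemin.length), j < T → chemin[j]'hj ∈ g.keys := by
    intro j hj hjT
    by_contra hnk
    have hgd : chemin.getD j 0 = chemin[j] := List.getD_eq_getElem chemin 0 hj
    have := hinv j hj (by rw [hgd]; exact hnk)
    exact absurd (hleast j this) (by omega)
  have hsub : ∀ n, n ≤ T → pvS g chemin n ⊆ g.keys.toFinset :=
    fun n hn => (pvS_keys_le g chemin T hadj hcT n hn).1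
  -- A computes T
  have hinv0 : pvInvA g chemin 0
      (g.keys.foldl (fun d sommet => d.insert sommet (0 : Int)) PySem.Dict.empty)
      PySem.Set.empty PySem.Set.empty := by
    refine ⟨?_, by simp [PySem.Set.empty], by simp [PySem.Set.empty, pvS_zero],
      by simp [PySem.Set.empty], by simp [PySem.Set.empty, pvF_zero]⟩
    intro v
    rw [pvGetD_foldl_insert_const]
    simp [pvS_zero, pvF_zero, PySem.Dict.getD_empty]
  have hA : iterations_brulage_totale graphe chemin = ((T : Nat) : Int) := by
    have hiter : iterations_brulage_totale graphe chemin
        = pvLoopA g chemin (g.size : Int) (chemin.length + g.size + 1)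
            (g.keys.foldl (fun d sommet => d.insert sommet (0 : Int)) PySem.Dict.empty)
            PySem.Set.empty PySem.Set.empty 0 := by
      rw [hg]; rfl
    have hra := pvRunA g chemin hknd T hT hmin hsub
      (chemin.length + g.size + 1) 0
      (g.keys.foldl (fun d sommet => d.insert sommet (0 : Int)) PySem.Dict.empty)
      PySem.Set.empty PySem.Set.empty hinv0 (Nat.zero_le _)
      (by omega)
    rw [Nat.cast_zero] at hra
    rw [hiter, hra]
  -- B computes T
  set bt0 := (PySem.List.enumerate chemin).foldl (fun bt p =>
      if g.contains p.2 then
        match bt.get? p.2 with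
        | none => bt.insert p.2 (p.1 + 1)
        | some tb => if p.1 + 1 < tb then bt.insert p.2 (p.1 + 1) else bt
      else bt) PySem.Dict.empty with hbt0
  have hiterB : iterations_brulage_totale_alt graphe chemin
      = PySem.List.maxD (g.keys.map (fun k =>
          (pvRoundsB g (g.size + chemin.length) bt0).getD k 0)) (fun x => x) 0 := by
    rw [hg]; rfl
  set R := g.size + chemin.length with hR
  set btF := pvRoundsP g R bt0 with hbtF
  have hBP : pvRoundsB g R bt0 = btF := pvRoundsB_eq g R bt0
  have hs0 : pvSound g chemin bt0 := by
    refine pvInitFold_sound g chemin (PySem.List.enumerate chemin) ?_ PySem.Dict.empty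
      ⟨by simp [PySem.Dict.keys_empty], by intro v t hv; rw [PySem.Dict.get?_empty] at hv; cases hv⟩
    intro p hp
    rw [PySem.List.mem_enumerate_iff] at hp
    obtain ⟨k, hk, rfl⟩ := hp
    exact ⟨k, hk, by simp⟩
  have hsF : pvSound g chemin btF := pvRoundsP_sound g chemin hadj hknd R bt0 hs0
  have hup := pvUpper g chemin T hknd hcT hsub R
  have hTR : T ≤ R + 1 := by omega
  set vals := g.keys.map (fun k => btF.getD k 0) with hvals
  -- every listed burn time is ≤ T
  have hvle : ∀ x ∈ vals, x ≤ ((T : Nat) : Int) := by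
    intro x hx
    rw [hvals] at hx
    obtain ⟨k, hk, rfl⟩ := List.mem_map.mp hx
    obtain ⟨t', hg', hle'⟩ := hup T (by omega) (le_refl T) k (hT (List.mem_toFinset.mpr hk))
    rw [PySem.Dict.getD_of_get?_eq_some _ _ hg']
    exact hle'
  rcases Nat.eq_zero_or_pos T with hT0 | hT1
  · -- empty graph: no vertices, max defaults to 0
    have hkeys0 : g.keys = [] := by
      have hsub0 : g.keys.toFinset ⊆ (∅ : Finset Int) := by
        rw [← pvS_zero g chemin, ← hT0]; exact hT
      cases hke : g.keys with
      | nil => rfl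
      | cons a l =>
        exfalso
        exact absurd (hsub0 (by rw [hke]; simp)) (Finset.notMem_empty a)
    rw [hA, hiterB, hBP, hT0, hkeys0]
    simp [PySem.List.maxD, PySem.List.max?]
  · -- T ≥ 1: pick a vertex that burns exactly at iteration T
    obtain ⟨vstar, hvk, hvnot⟩ :
        ∃ v, v ∈ g.keys.toFinset ∧ v ∉ pvS g chemin (T - 1) := by
      by_contra hcon
      refine hmin (T - 1) (by omega) (fun x hx => ?_)
      by_contra hnot
      exact hcon ⟨x, hx, hnot⟩
    obtain ⟨tst, hgst, hlest⟩ := hup T (by omega) (le_refl T) vstar (hT hvk)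
    obtain ⟨-, n, rfl, hvS⟩ := hsF.2 vstar tst hgst
    have hnT : T ≤ n := by
      by_contra hlt
      exact hvnot (pvS_mono g chemin (by omega) hvS)
    have htT : (n : Int) = ((T : Nat) : Int) := by
      have hle : n ≤ T := by exact_mod_cast hlest
      omega
    have hTin : ((T : Nat) : Int) ∈ vals := by
      rw [hvals]
      refine List.mem_map.mpr ⟨vstar, List.mem_toFinset.mp hvk, ?_⟩
      rw [PySem.Dict.getD_of_get?_eq_some _ _ hgst, htT]
    rw [hA, hiterB, hBP]
    unfold PySem.List.maxD
    cases hmax : PySem.List.max? vals (fun x => x) with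
    | none =>
      exfalso
      rw [PySem.List.max?_eq_none_iff] at hmax
      rw [hmax] at hTin
      simp at hTin
    | some m =>
      have hm1 : m ≤ ((T : Nat) : Int) := hvle m (PySem.List.max?_mem hmax)
      have hm2 : ((T : Nat) : Int) ≤ m := PySem.List.max?_isMax hmax _ hTin
      simp only [Option.getD_some]
      omega

-- ===== VERDICT (by name: the statement is the Claim_ definition above) =====
theorem iterations_brulage_totale_spec : Claim_equal_iterations_brulage_totale := by
  intro graphe chemin _ hpre
  exact pvMain graphe chemin hpre
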